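-- pv_equiv track=rewrite | github.com/NautiyalLab/OperantBehaviorAnalysis-Python | operantanalysis/operantanalysis.py | bin_by_time
-- ===== SOURCE A (Python) =====
-- def get_events_indices(eventcode, eventtypes):
--     """
--     :param eventcode: list of event codes from operant conditioning file
--     :param eventtypes: list of event types to index
--     :return: list of indices of target events
--     """
--     return [i for i, event in enumerate(eventcode) if event in eventtypes]
--
-- def bin_by_time(timecode, eventcode, bin_length, counted_event):
--     """
--     :param timecode: list of time codes from operant conditioning file
--     :param eventcode: list of event codes from operant conditioning file
--     :param bin_length: length of time in seconds to split the session into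
--     :param counted_event: event that is counted in each bin, in list format
--     :return: a list of counts of specified event for each bin
--     """
--     event_on_list = get_events_indices(eventcode, counted_event)
--
--     if timecode[-1] % bin_length != 0:
--         num_bins = int(timecode[-1] // bin_length) + 1
--     elif timecode[-1] % bin_length == 0:
--         num_bins = int(timecode[-1] // bin_length)
--     counts_for_each_bin = [0] * num_bins
--
--     for i in range(num_bins):
--         for event_on in event_on_list:
--             if (i + 1) != num_bins and (i + 1) * bin_length > timecode[event_on] >= i * bin_length:
--                 counts_for_each_bin[i] += 1
--             elif (i + 1) == num_bins and timecode[event_on] >= i * bin_length: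
--                 counts_for_each_bin[i] += 1
--
--     return counts_for_each_bin
-- ===== SOURCE B (Python) =====
-- def get_events_indices(eventcode, eventtypes):
--     return [i for i, event in enumerate(eventcode) if event in eventtypes]
--
--
-- def bin_by_time(timecode, eventcode, bin_length, counted_event):
--     last_bin = timecode[-1] // bin_length + (0 if timecode[-1] % bin_length == 0 else 1) - 1
--     counts = [0] * (last_bin + 1)
--     if last_bin >= 0:
--         for i in get_events_indices(eventcode, counted_event):
--             b = timecode[i] // bin_length
--             if b >= 0:
--                 counts[min(b, last_bin)] += 1
--     return counts
-- ===== Notes on version B (the rewrite author's own statement) =====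
-- stated objective: alternative
-- what changed: B replaces A's nested scan (for every bin, re-scan the whole event list) with a single pass over the events that computes each event's bin directly as floor(time/bin_length) clamped to the last bin.
-- outside the precondition, e.g. on bin_by_time([-10], [1], -3, [1]): A returns [0, 0, 0, 0], B returns [0, 0, 0, 1]
import Mathlib
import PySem

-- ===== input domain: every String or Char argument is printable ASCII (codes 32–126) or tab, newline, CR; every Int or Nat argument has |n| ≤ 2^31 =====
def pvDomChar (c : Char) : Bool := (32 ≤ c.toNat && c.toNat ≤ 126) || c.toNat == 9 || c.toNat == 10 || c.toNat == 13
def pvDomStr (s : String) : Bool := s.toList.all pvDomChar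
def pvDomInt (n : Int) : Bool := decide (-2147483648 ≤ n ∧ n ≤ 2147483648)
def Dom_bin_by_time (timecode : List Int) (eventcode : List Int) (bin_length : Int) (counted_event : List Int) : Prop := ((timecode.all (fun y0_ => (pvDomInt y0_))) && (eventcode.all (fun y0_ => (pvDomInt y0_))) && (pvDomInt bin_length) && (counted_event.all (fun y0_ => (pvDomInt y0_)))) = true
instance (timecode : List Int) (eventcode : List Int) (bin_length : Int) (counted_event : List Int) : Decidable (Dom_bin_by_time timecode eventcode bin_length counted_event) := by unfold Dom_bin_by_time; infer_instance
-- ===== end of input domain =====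

-- B replaces A's per-bin rescan of the events with one pass assigning each event to bin floor(t/bin_length) clamped to the last bin.


-- ===== PORT A =====
def get_events_indices (eventcode : List Int) (eventtypes : List Int) : List Int :=
  (PySem.List.enumerate eventcode).foldl
    (fun acc p => if p.2 ∈ eventtypes then acc ++ [p.1] else acc) []

def bin_by_time (timecode : List Int) (eventcode : List Int) (bin_length : Int) (counted_event : List Int) : List Int :=
  let event_on_list := get_events_indices eventcode counted_event
  match PySem.List.pyGet? timecode (-1) with
  | none => []           -- IndexError: empty timecode (outside Pre_)
  | some last =>
    if bin_length = 0 then []   -- ZeroDivisionError (outside Pre_)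
    else
      let num_bins : Int :=
        if PySem.Int.mod last bin_length ≠ 0 then PySem.Int.floordiv last bin_length + 1
        else PySem.Int.floordiv last bin_length
      let counts := List.replicate num_bins.toNat (0 : Int)
      (PySem.List.pyRange 0 num_bins 1).foldl (fun counts i =>
        event_on_list.foldl (fun counts event_on =>
          let t := PySem.List.pyGetD timecode event_on 0
          if (i + 1) ≠ num_bins ∧ ((i + 1) * bin_length > t ∧ t ≥ i * bin_length) then
            PySem.List.pySetD counts i (PySem.List.pyGetD counts i 0 + 1)
          else if (i + 1) = num_bins ∧ t ≥ i * bin_length then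
            PySem.List.pySetD counts i (PySem.List.pyGetD counts i 0 + 1)
          else counts) counts) counts

-- ===== PORT B =====
def bin_by_time_alt (timecode : List Int) (eventcode : List Int) (bin_length : Int) (counted_event : List Int) : List Int :=
  match PySem.List.pyGet? timecode (-1) with
  | none => []           -- IndexError: empty timecode (outside Pre_)
  | some last =>
    if bin_length = 0 then []   -- ZeroDivisionError (outside Pre_)
    else
      let last_bin : Int :=
        PySem.Int.floordiv last bin_length +
          (if PySem.Int.mod last bin_length = 0 then 0 else 1) - 1
      let counts := List.replicate (last_bin + 1).toNat (0 : Int)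
      if last_bin ≥ 0 then
        (get_events_indices eventcode counted_event).foldl (fun counts i =>
          let b := PySem.Int.floordiv (PySem.List.pyGetD timecode i 0) bin_length
          if b ≥ 0 then
            PySem.List.pySetD counts (min b last_bin) (PySem.List.pyGetD counts (min b last_bin) 0 + 1)
          else counts) counts
      else counts

-- ===== PRECONDITION & SPEC =====
-- Pre_ excludes the inputs where A raises (empty timecode → IndexError; bin_length = 0 →
-- ZeroDivisionError; a counted-event index past the end of timecode → IndexError) and
-- negative bin_length, on which A's reversed bin intervals are all empty and its all-zero
-- count list is an artefact of the loop conditions.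
def Pre_bin_by_time (timecode : List Int) (eventcode : List Int) (bin_length : Int) (counted_event : List Int) : Prop :=
  timecode ≠ [] ∧ 0 < bin_length ∧
    ∀ i : Nat, i < eventcode.length → eventcode.getD i 0 ∈ counted_event → i < timecode.length

instance (timecode : List Int) (eventcode : List Int) (bin_length : Int) (counted_event : List Int) : Decidable (Pre_bin_by_time timecode eventcode bin_length counted_event) := by
  unfold Pre_bin_by_time; infer_instance

def pvWitness_bin_by_time : List Int × List Int × Int × List Int :=
  ([3, 7, 12], [1, 2, 1], 5, [1])

def Spec_bin_by_time (timecode : List Int) (eventcode : List Int) (bin_length : Int) (counted_event : List Int) (out : List Int) : Prop := out = bin_by_time_alt timecode eventcode bin_length counted_event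
instance (timecode : List Int) (eventcode : List Int) (bin_length : Int) (counted_event : List Int) (out : List Int) : Decidable (Spec_bin_by_time timecode eventcode bin_length counted_event out) := by unfold Spec_bin_by_time; infer_instance

-- ===== CLAIM (what is proved, stated in full; the proofs are below) =====
def Claim_equal_bin_by_time : Prop := ∀ (timecode : List Int) (eventcode : List Int) (bin_length : Int) (counted_event : List Int), Dom_bin_by_time timecode eventcode bin_length counted_event → Pre_bin_by_time timecode eventcode bin_length counted_event → Spec_bin_by_time timecode eventcode bin_length counted_event (bin_by_time timecode eventcode bin_length counted_event)

-- ===== LEMMAS AND PROOFS =====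

-- A's outer loop, over Nat bin indices, generic in the two branch conditions.
def pvFoldA {α : Type} (L : List α) (c1 c2 : Nat → α → Prop)
    [∀ k a, Decidable (c1 k a)] [∀ k a, Decidable (c2 k a)] (N m : Nat) : List Int :=
  (List.range m).foldl (fun cs k =>
    L.foldl (fun cs ev =>
      if c1 k ev then cs.set k (cs.getD k 0 + 1)
      else if c2 k ev then cs.set k (cs.getD k 0 + 1)
      else cs) cs) (List.replicate N (0 : Int))

-- B's single histogram pass, generic in the bin map.
def pvFoldB {α : Type} (L : List α) (f : α → Int) (M : Int) (cs : List Int) : List Int :=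
  L.foldl (fun cs ev =>
    if f ev ≥ 0 then
      PySem.List.pySetD cs (min (f ev) M) (PySem.List.pyGetD cs (min (f ev) M) 0 + 1)
    else cs) cs

lemma pv_getD_set (cs : List Int) (j k : Nat) (v : Int) (hj : j < cs.length) :
    (cs.set j v).getD k 0 = if k = j then v else cs.getD k 0 := by
  by_cases h : k = j
  · subst h; simp [List.getD_eq_getElem?_getD, List.getElem?_set_self hj]
  · simp [List.getD_eq_getElem?_getD, List.getElem?_set_ne (fun e => h e.symm), h]

lemma pv_innerA {α : Type} (c1 c2 : α → Prop) [DecidablePred c1] [DecidablePred c2] (k : Nat) :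
    ∀ (L : List α) (cs : List Int), k < cs.length →
    L.foldl (fun cs ev =>
      if c1 ev then cs.set k (cs.getD k 0 + 1)
      else if c2 ev then cs.set k (cs.getD k 0 + 1)
      else cs) cs
    = cs.set k (cs.getD k 0 + (L.countP (fun ev => decide (c1 ev ∨ c2 ev)) : Int)) := by
  intro L
  induction L with
  | nil =>
      intro cs h
      simp only [List.foldl_nil, List.countP_nil, Nat.cast_zero, add_zero]
      rw [List.getD_eq_getElem cs 0 h, List.set_getElem_self]
  | cons a L ih =>
      intro cs h
      simp only [List.foldl_cons, List.countP_cons]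
      by_cases h1 : c1 a
      · rw [if_pos h1, ih _ (by simpa using h), List.set_set,
            pv_getD_set cs k k _ h, if_pos rfl]
        have hd : decide (c1 a ∨ c2 a) = true := by simp [h1]
        rw [hd]
        congr 1
        simp only [if_pos]
        push_cast
        ring
      · rw [if_neg h1]
        by_cases h2 : c2 a
        · rw [if_pos h2, ih _ (by simpa using h), List.set_set,
              pv_getD_set cs k k _ h, if_pos rfl]
          have hd : decide (c1 a ∨ c2 a) = true := by simp [h2]
          rw [hd]
          congr 1
          simp only [if_pos]
          push_cast
          ring
        · rw [if_neg h2, ih _ h]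
          have : decide (c1 a ∨ c2 a) = false := by simp [h1, h2]
          rw [this]
          simp

lemma pv_foldA_spec {α : Type} (L : List α) (c1 c2 : Nat → α → Prop)
    [∀ k a, Decidable (c1 k a)] [∀ k a, Decidable (c2 k a)] (N : Nat) :
    ∀ (m : Nat), m ≤ N →
      (pvFoldA L c1 c2 N m).length = N ∧
      ∀ k : Nat, (pvFoldA L c1 c2 N m).getD k 0 =
        if k < m then (L.countP (fun ev => decide (c1 k ev ∨ c2 k ev)) : Int) else 0 := by
  intro m
  induction m with
  | zero =>
      intro _
      refine ⟨by simp [pvFoldA], ?_⟩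
      intro k
      simp only [pvFoldA, List.range_zero, List.foldl_nil]
      by_cases hk : k < N
      · rw [List.getD_replicate (0 : Int) hk, if_neg (Nat.not_lt_zero k)]
      · rw [List.getD_eq_getElem?_getD, List.getElem?_eq_none (by simp; omega)]
        simp
  | succ m ih =>
      intro hm
      obtain ⟨hlen, hget⟩ := ih (by omega)
      have hstep : pvFoldA L c1 c2 N (m + 1)
          = (pvFoldA L c1 c2 N m).set m ((pvFoldA L c1 c2 N m).getD m 0
              + (L.countP (fun ev => decide (c1 m ev ∨ c2 m ev)) : Int)) := by
        have h0 : pvFoldA L c1 c2 N (m + 1)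
            = L.foldl (fun cs ev =>
                if c1 m ev then cs.set m (cs.getD m 0 + 1)
                else if c2 m ev then cs.set m (cs.getD m 0 + 1)
                else cs) (pvFoldA L c1 c2 N m) := by
          simp only [pvFoldA, List.range_succ, List.foldl_append, List.foldl_cons, List.foldl_nil]
        rw [h0]
        exact pv_innerA (c1 m) (c2 m) m L (pvFoldA L c1 c2 N m) (by rw [hlen]; omega)
      rw [hget m, if_neg (lt_irrefl m), zero_add] at hstep
      refine ⟨by rw [hstep]; simp [hlen], ?_⟩
      intro k
      rw [hstep, pv_getD_set _ m k _ (by rw [hlen]; omega)]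
      by_cases hkm : k = m
      · subst hkm
        rw [if_pos rfl, if_pos (by omega)]
      · rw [if_neg hkm, hget k]
        by_cases hlt : k < m
        · rw [if_pos hlt, if_pos (by omega)]
        · rw [if_neg hlt, if_neg (by omega)]

lemma pv_foldB_length {α : Type} (L : List α) (f : α → Int) (M : Int) :
    ∀ cs : List Int, (pvFoldB L f M cs).length = cs.length := by
  induction L with
  | nil => intro cs; simp [pvFoldB]
  | cons a L ih =>
      intro cs
      have hcons : pvFoldB (a :: L) f M cs
          = pvFoldB L f M (if f a ≥ 0 then
              PySem.List.pySetD cs (min (f a) M) (PySem.List.pyGetD cs (min (f a) M) 0 + 1)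
            else cs) := rfl
      rw [hcons]
      by_cases h : f a ≥ 0
      · rw [if_pos h, ih _, PySem.List.length_pySetD]
      · rw [if_neg h, ih cs]

lemma pv_foldB_getD {α : Type} (f : α → Int) (M : Int) (hM : 0 ≤ M) :
    ∀ (L : List α) (cs : List Int) (k : Nat), (M : Int) < cs.length → k < cs.length →
    (pvFoldB L f M cs).getD k 0 = cs.getD k 0
      + (L.countP (fun ev => decide (f ev ≥ 0 ∧ min (f ev) M = (k : Int))) : Int) := by
  intro L
  induction L with
  | nil => intro cs k _ _; simp [pvFoldB]
  | cons a L ih =>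
      intro cs k hMlen hk
      have hcons : pvFoldB (a :: L) f M cs
          = pvFoldB L f M (if f a ≥ 0 then
              PySem.List.pySetD cs (min (f a) M) (PySem.List.pyGetD cs (min (f a) M) 0 + 1)
            else cs) := rfl
      rw [hcons, List.countP_cons]
      by_cases h0 : f a ≥ 0
      · rw [if_pos h0]
        have hmin0 : (0 : Int) ≤ min (f a) M := le_min h0 hM
        have hminM : min (f a) M ≤ M := min_le_right _ _
        set j : Nat := (min (f a) M).toNat with hj
        have hjlen : j < cs.length := by omega
        have hcast : ((j : Nat) : Int) = min (f a) M := by omega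
        rw [PySem.List.pySetD_of_nonneg _ _ hmin0, PySem.List.pyGetD_of_nonneg _ _ hmin0, ← hj]
        rw [ih (cs.set j (cs.getD j 0 + 1)) k (by simpa using hMlen) (by simpa using hk)]
        rw [pv_getD_set cs j k _ hjlen]
        by_cases hkj : k = j
        · rw [if_pos hkj]
          have hd : decide (f a ≥ 0 ∧ min (f a) M = (k : Int)) = true := by
            simp only [decide_eq_true_eq]
            exact ⟨h0, by omega⟩
          rw [hd, hkj]
          simp only [if_true]
          push_cast
          ring
        · rw [if_neg hkj]
          have hd : decide (f a ≥ 0 ∧ min (f a) M = (k : Int)) = false := by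
            simp only [decide_eq_false_iff_not, not_and]
            intro _ he
            exact hkj (by omega)
          rw [hd]
          simp
      · rw [if_neg h0]
        have hd : decide (f a ≥ 0 ∧ min (f a) M = (k : Int)) = false := by
          simp only [decide_eq_false_iff_not, not_and]
          intro h; exact absurd h h0
        rw [hd, ih cs k hMlen hk]
        simp

-- the per-event bin characterization: A's bin-k membership test is exactly
-- "floor(t/bl) clamped to the last bin equals k", for 0 < bl and k < n.
lemma pv_cond_iff (bl n t : Int) (k : Nat) (hbl : 0 < bl) (hk : (k : Int) < n) :
    ((((k : Int) + 1) ≠ n ∧ (((k : Int) + 1) * bl > t ∧ t ≥ (k : Int) * bl)) ∨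
      (((k : Int) + 1) = n ∧ t ≥ (k : Int) * bl))
    ↔ (PySem.Int.floordiv t bl ≥ 0 ∧ min (PySem.Int.floordiv t bl) (n - 1) = (k : Int)) := by
  have h1 : ∀ q : Int, (q * bl ≤ t) ↔ (q ≤ PySem.Int.floordiv t bl) :=
    fun q => (PySem.Int.le_floordiv_iff_mul_le hbl).symm
  have h2 : ∀ q : Int, (t < q * bl) ↔ (PySem.Int.floordiv t bl < q) :=
    fun q => (PySem.Int.floordiv_lt_iff_lt_mul hbl).symm
  simp only [ge_iff_le, gt_iff_lt]
  rw [h2 ((k : Int) + 1), h1 ((k : Int))]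
  omega

-- the heart of the proof: A's per-bin rescan and B's one-pass histogram build the same list.
theorem pv_key (timecode : List Int) (eventcode : List Int) (bin_length : Int)
    (counted_event : List Int) (n : Int) (hbl : 0 < bin_length) (hpos : 0 < n) :
    pvFoldA (get_events_indices eventcode counted_event)
      (fun k ev => ((k : Int) + 1) ≠ n ∧
        (((k : Int) + 1) * bin_length > PySem.List.pyGetD timecode ev 0 ∧
          PySem.List.pyGetD timecode ev 0 ≥ (k : Int) * bin_length))
      (fun k ev => ((k : Int) + 1) = n ∧
        PySem.List.pyGetD timecode ev 0 ≥ (k : Int) * bin_length)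
      n.toNat n.toNat
    = pvFoldB (get_events_indices eventcode counted_event)
        (fun ev => PySem.Int.floordiv (PySem.List.pyGetD timecode ev 0) bin_length)
        (n - 1) (List.replicate n.toNat (0 : Int)) := by
  set L := get_events_indices eventcode counted_event with hL
  set f : Int → Int := fun ev => PySem.Int.floordiv (PySem.List.pyGetD timecode ev 0) bin_length with hf
  set N := n.toNat with hN
  have hNn : (N : Int) = n := by omega
  obtain ⟨hlenA, hgetA⟩ := pv_foldA_spec L
    (fun k ev => ((k : Int) + 1) ≠ n ∧
      (((k : Int) + 1) * bin_length > PySem.List.pyGetD timecode ev 0 ∧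
        PySem.List.pyGetD timecode ev 0 ≥ (k : Int) * bin_length))
    (fun k ev => ((k : Int) + 1) = n ∧
      PySem.List.pyGetD timecode ev 0 ≥ (k : Int) * bin_length) N N le_rfl
  have hlenB := pv_foldB_length L f (n - 1) (List.replicate N (0 : Int))
  apply List.ext_getElem (by rw [hlenA, hlenB, List.length_replicate])
  intro i h1 h2
  have hiN : i < N := by rwa [hlenA] at h1
  rw [← List.getD_eq_getElem _ 0 h1, ← List.getD_eq_getElem _ 0 h2]
  rw [hgetA i, if_pos hiN]
  rw [pv_foldB_getD f (n - 1) (by omega) L (List.replicate N (0 : Int)) i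
    (by rw [List.length_replicate]; omega) (by rw [List.length_replicate]; exact hiN)]
  rw [List.getD_replicate (0 : Int) hiN, zero_add]
  congr 1
  apply List.countP_congr
  intro ev _
  simp only [decide_eq_true_eq]
  exact pv_cond_iff bin_length n (PySem.List.pyGetD timecode ev 0) i hbl (by omega)

theorem pv_main (timecode : List Int) (eventcode : List Int) (bin_length : Int)
    (counted_event : List Int) (hne : timecode ≠ []) (hbl : 0 < bin_length) :
    bin_by_time timecode eventcode bin_length counted_event
      = bin_by_time_alt timecode eventcode bin_length counted_event := by
  have hg : PySem.List.pyGet? timecode (-1) = some (timecode.getLast hne) := by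
    rw [PySem.List.pyGet?_neg_one]
    exact List.getLast?_eq_some_getLast hne
  unfold bin_by_time bin_by_time_alt
  simp only [hg]
  rw [if_neg (by omega : ¬ bin_length = 0), if_neg (by omega : ¬ bin_length = 0)]
  set lst := timecode.getLast hne with hlst
  set L := get_events_indices eventcode counted_event with hL
  set q := PySem.Int.floordiv lst bin_length with hq
  set r := PySem.Int.mod lst bin_length with hr
  set n : Int := if r ≠ 0 then q + 1 else q with hn
  have hlb : q + (if r = 0 then 0 else 1) - 1 = n - 1 := by
    by_cases h : r = 0 <;> simp [hn, h]
  rw [hlb]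
  have hsum : n - 1 + 1 = n := by ring
  rw [hsum]
  by_cases hpos : n - 1 ≥ 0
  · rw [if_pos hpos]
    set N := n.toNat with hN
    have hNn : (N : Int) = n := by omega
    have hrange : PySem.List.pyRange 0 n 1 = (List.range N).map (fun k => ((k : Nat) : Int)) := by
      rw [PySem.List.pyRange_one]
      simp [hN]
    rw [hrange, List.foldl_map]
    simp only [PySem.List.pySetD_natCast, PySem.List.pyGetD_natCast]
    exact pv_key timecode eventcode bin_length counted_event n hbl (by omega)
  · rw [if_neg hpos]
    rw [PySem.List.pyRange_one_eq_nil (by omega), List.foldl_nil]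

-- ===== VERDICT (by name: the statement is the Claim_ definition above) =====
theorem bin_by_time_spec : Claim_equal_bin_by_time := by
  intro timecode eventcode bin_length counted_event _ hpre
  unfold Spec_bin_by_time
  exact pv_main timecode eventcode bin_length counted_event hpre.1 hpre.2.1
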